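-- pv_equiv track=rewrite | github.com/larineoy/-SleepStages-Abnormal-SpikeProb-Analysis- | Prob_Calculation/SpikeProb_awake.py | count_threes_between_zeros
-- ===== SOURCE A (Python) =====
-- def count_threes_between_zeros(array):
--     total_threes_between_zeros = 0
--
--     i = 0
--     while i < len(array):
--         # Check if the current element is a 0
--         if array[i] == 0:
--             j = i + 1
--             count_threes = 0
--
--             # Count the number of 3s until the next 0
--             while j < len(array) and array[j] == 3:
--                 count_threes += 1
--                 j += 1
--
--             # If we found a 0 after the 3s, add the number of 3s to the total
--             if j < len(array) and array[j] == 0: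
--                 total_threes_between_zeros += count_threes
--
--             # Move the index to the second 0
--             i = j
--         else:
--             i += 1
--
--     return total_threes_between_zeros
-- ===== SOURCE B (Python) =====
-- def count_threes_between_zeros(array):
--     # Single flat pass with two state variables instead of an inner while + index jump.
--     total = 0
--     in_run = False
--     count = 0
--     for x in array:
--         if x == 3:
--             if in_run:
--                 count += 1
--         elif x == 0:
--             if in_run:
--                 total += count
--             in_run = True
--             count = 0
--         else:
--             in_run = False
--             count = 0
--     return total
-- ===== Notes on version B (the rewrite author's own statement) =====
-- stated objective: simpler
-- what changed: Replaces A's outer index loop with an inner while and an i=j index jump by a single flat pass over the elements carrying two state variables (in_run, count).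
import Mathlib
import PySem

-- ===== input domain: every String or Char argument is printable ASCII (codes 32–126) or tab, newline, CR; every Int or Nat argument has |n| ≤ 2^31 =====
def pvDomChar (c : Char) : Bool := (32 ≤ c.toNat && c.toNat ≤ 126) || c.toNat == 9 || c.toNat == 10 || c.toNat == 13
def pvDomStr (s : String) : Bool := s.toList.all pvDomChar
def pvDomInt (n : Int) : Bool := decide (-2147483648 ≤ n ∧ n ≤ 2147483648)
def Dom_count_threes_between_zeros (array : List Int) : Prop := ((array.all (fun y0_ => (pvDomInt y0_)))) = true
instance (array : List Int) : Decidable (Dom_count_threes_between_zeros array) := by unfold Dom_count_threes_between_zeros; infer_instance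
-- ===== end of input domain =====

-- B replaces A's inner `while` and index jump by one flat pass with two state variables (simpler decomposition).

-- ===== PORT A =====
-- inner while: count of consecutive 3s starting at index j
def ctbzInner (array : List Int) (j : Nat) : Nat :=
  if _h : j < array.length ∧ array.getD j 0 = 3 then
    ctbzInner array (j + 1) + 1
  else 0
termination_by array.length - j

-- outer while loop over index i with accumulator total
def ctbzLoop (array : List Int) (i : Nat) (total : Int) : Int :=
  if _h : i < array.length then
    if array.getD i 0 = 0 then
      let c := ctbzInner array (i + 1)
      let j := i + 1 + c
      let total' := if j < array.length ∧ array.getD j 0 = 0 then total + (c : Int) else total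
      ctbzLoop array j total'
    else
      ctbzLoop array (i + 1) total
  else total
termination_by array.length - i

def count_threes_between_zeros (array : List Int) : Int := ctbzLoop array 0 0

-- ===== PORT B =====
-- one step of the flat loop: state = (in_run, count, total)
def ctbzStep (st : Bool × Int × Int) (x : Int) : Bool × Int × Int :=
  match st with
  | (inRun, count, total) =>
    if x = 3 then (inRun, if inRun then count + 1 else count, total)
    else if x = 0 then (true, 0, if inRun then total + count else total)
    else (false, 0, total)

def count_threes_between_zeros_alt (array : List Int) : Int :=
  (array.foldl ctbzStep (false, 0, 0)).2.2

-- ===== PRECONDITION & SPEC =====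
def Spec_count_threes_between_zeros (array : List Int) (out : Int) : Prop := out = count_threes_between_zeros_alt array
instance (array : List Int) (out : Int) : Decidable (Spec_count_threes_between_zeros array out) := by unfold Spec_count_threes_between_zeros; infer_instance

-- ===== CLAIM (what is proved, stated in full; the proofs are below) =====
def Claim_equal_count_threes_between_zeros : Prop := ∀ (array : List Int), Dom_count_threes_between_zeros array → Spec_count_threes_between_zeros array (count_threes_between_zeros array)

-- ===== LEMMAS AND PROOFS =====

-- A clean structural specification both ports are reduced to.
-- S l: total for suffix l when not inside a run; T c l: total when inside a run with c threes counted so far.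
mutual
def ctbzS : List Int → Int
  | [] => 0
  | x :: l => if x = 0 then ctbzT 0 l else ctbzS l

def ctbzT : Int → List Int → Int
  | _, [] => 0
  | c, x :: l =>
    if x = 3 then ctbzT (c + 1) l
    else if x = 0 then c + ctbzT 0 l
    else ctbzS l
end

-- B's fold computes S / T.
theorem ctbz_fold_spec (l : List Int) : ∀ (c c' t : Int),
    (l.foldl ctbzStep (false, c', t)).2.2 = t + ctbzS l ∧
    (l.foldl ctbzStep (true, c, t)).2.2 = t + ctbzT c l := by
  induction l with
  | nil => intro c c' t; simp [ctbzS, ctbzT]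
  | cons x l ih =>
    intro c c' t
    constructor
    · by_cases h3 : x = 3
      · simp only [List.foldl_cons, ctbzStep, h3, if_pos rfl, if_true]
        simpa [ctbzS, ctbzT, h3] using (ih c c' t).1
      · by_cases h0 : x = 0
        · simp only [List.foldl_cons, ctbzStep, h3, h0, if_neg h3, if_pos rfl, if_false]
          simpa [ctbzS, ctbzT, h3, h0] using (ih 0 c' t).2
        · simp only [List.foldl_cons, ctbzStep, if_neg h3, if_neg h0]
          simpa [ctbzS, ctbzT, h3, h0] using (ih c 0 t).1
    · by_cases h3 : x = 3
      · simp only [List.foldl_cons, ctbzStep, h3, if_pos rfl, if_true]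
        simpa [ctbzS, ctbzT, h3] using (ih (c + 1) c' t).2
      · by_cases h0 : x = 0
        · simp only [List.foldl_cons, ctbzStep, if_neg h3, h0, if_pos rfl]
          have := (ih 0 c' (t + c)).2
          simp only [List.foldl_cons, ctbzStep] at this ⊢
          simp [ctbzT, h3, h0, this]
          ring
        · simp only [List.foldl_cons, ctbzStep, if_neg h3, if_neg h0]
          simpa [ctbzT, h3, h0] using (ih c 0 t).1

theorem ctbz_alt_spec (array : List Int) : count_threes_between_zeros_alt array = ctbzS array := by
  have := (ctbz_fold_spec array 0 0 0).1
  simpa [count_threes_between_zeros_alt] using this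

-- drop j = array[j] :: drop (j+1), phrased with getD
theorem drop_cons_getD (array : List Int) (j : Nat) (h : j < array.length) :
    array.drop j = array.getD j 0 :: array.drop (j + 1) := by
  rw [List.getD_eq_getElem _ _ h]
  exact List.drop_eq_getElem_cons h

-- A's inner while vs T
theorem ctbz_inner_spec (array : List Int) : ∀ n j, array.length - j ≤ n → ∀ c : Int,
    ctbzT c (array.drop j) =
      (if j + ctbzInner array j < array.length ∧ array.getD (j + ctbzInner array j) 0 = 0
        then c + (ctbzInner array j : Int) else 0)
      + ctbzS (array.drop (j + ctbzInner array j)) := by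
  intro n
  induction n with
  | zero =>
    intro j hj c
    have hj' : array.length ≤ j := by omega
    rw [ctbzInner]
    have hnot : ¬ (j < array.length ∧ array.getD j 0 = 3) := by omega
    rw [dif_neg hnot]
    simp [List.drop_eq_nil_of_le hj', ctbzT, ctbzS, Nat.not_lt_of_le hj']
  | succ n ih =>
    intro j hj c
    by_cases h : j < array.length ∧ array.getD j 0 = 3
    · rw [ctbzInner, dif_pos h]
      have hd := drop_cons_getD array j h.1
      rw [hd, h.2]
      have := ih (j + 1) (by omega) (c + 1)
      rw [ctbzT, if_pos rfl, this]
      have harith : j + 1 + ctbzInner array (j + 1) = j + (ctbzInner array (j + 1) + 1) := by omega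
      rw [harith]
      push_cast
      ring_nf
    · rw [ctbzInner, dif_neg h]
      simp only [Nat.add_zero]
      by_cases hlt : j < array.length
      · have h3 : array.getD j 0 ≠ 3 := fun hc => h ⟨hlt, hc⟩
        rw [drop_cons_getD array j hlt]
        by_cases h0 : array.getD j 0 = 0
        · rw [ctbzT, if_neg h3, if_pos h0, if_pos ⟨hlt, h0⟩, ctbzS, if_pos h0]
          push_cast; ring
        · rw [ctbzT, if_neg h3, if_neg h0, if_neg (by tauto), ctbzS, if_neg h0]
          ring
      · rw [if_neg (by tauto)]
        have : array.drop j = [] := List.drop_eq_nil_of_le (by omega)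
        simp [this, ctbzT, ctbzS]

-- A's outer loop vs S
theorem ctbz_loop_spec (array : List Int) : ∀ n i total, array.length - i ≤ n →
    ctbzLoop array i total = total + ctbzS (array.drop i) := by
  intro n
  induction n with
  | zero =>
    intro i total hi
    rw [ctbzLoop, dif_neg (by omega)]
    simp [List.drop_eq_nil_of_le (show array.length ≤ i by omega), ctbzS]
  | succ n ih =>
    intro i total hi
    by_cases hlt : i < array.length
    · rw [ctbzLoop, dif_pos hlt]
      by_cases h0 : array.getD i 0 = 0
      · rw [if_pos h0]
        have hinner := ctbz_inner_spec array (array.length - (i + 1)) (i + 1) (le_refl _) 0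
        have hrec := ih (i + 1 + ctbzInner array (i + 1)) (if i + 1 + ctbzInner array (i + 1) < array.length ∧
            array.getD (i + 1 + ctbzInner array (i + 1)) 0 = 0 then total + (ctbzInner array (i + 1) : Int) else total) (by omega)
        simp only [] at hrec ⊢
        rw [hrec, drop_cons_getD array i hlt, h0, ctbzS, if_pos rfl, hinner]
        split_ifs <;> ring
      · rw [if_neg h0, ih (i + 1) total (by omega), drop_cons_getD array i hlt, ctbzS, if_neg h0]
    · rw [ctbzLoop, dif_neg hlt]
      have hd : array.drop i = [] := List.drop_eq_nil_of_le (Nat.le_of_not_lt hlt)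
      simp [hd, ctbzS]

-- ===== VERDICT (by name: the statement is the Claim_ definition above) =====
theorem count_threes_between_zeros_spec : Claim_equal_count_threes_between_zeros := by
  intro array _
  unfold Spec_count_threes_between_zeros
  rw [ctbz_alt_spec, count_threes_between_zeros,
    ctbz_loop_spec array array.length 0 0 (by omega)]
  simp
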